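-- pv_equiv track=rewrite | github.com/Wonji1/coding-test | etc/coupang1.py | solution
-- ===== SOURCE A (Python) =====
-- def change(n,i):
--     Nums = "012345678"
--     str1 = ""
--     while n != 0:
--         if n % i == 0:
--             str1 += "0"
--         else:
--             str1 += str(Nums[n%i])
--         n = n // i
--     return(str1)[::-1]
--
-- def solution(N):
--     number= []
--     for i in range(2,10):
--         multi = 1
--         # 0 제거
--         no_zero = change(N,i).replace('0','')
--         for i in range(len(no_zero)):
--             multi *= int(no_zero[i])
--         number.append(multi)
--     # 뒤를 max로 하기위해
--     number = number[::-1]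
--
--     return [9- number.index(max(number)), max(number)]
-- ===== SOURCE B (Python) =====
-- def solution(N):
--     best_p = 0
--     best_b = 2
--     for b in range(2, 10):
--         p = 1
--         m = N
--         while m:
--             d = m % b
--             if d:
--                 p *= d
--             m //= b
--         if p >= best_p:
--             best_p = p
--             best_b = b
--     return [best_b, best_p]
-- ===== Notes on version B (the rewrite author's own statement) =====
-- stated objective: simpler
-- what changed: B replaces A's per-base pipeline (build a digit string, reverse it, strip zeros with replace, re-parse each character with int, collect all products in a list, reverse it and use max+index for the tie-break) by one running-best pass: the product of nonzero digits is accumulated arithmetically while dividing, and best product/base are kept with a >= update so the highest base wins ties.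
import Mathlib
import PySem

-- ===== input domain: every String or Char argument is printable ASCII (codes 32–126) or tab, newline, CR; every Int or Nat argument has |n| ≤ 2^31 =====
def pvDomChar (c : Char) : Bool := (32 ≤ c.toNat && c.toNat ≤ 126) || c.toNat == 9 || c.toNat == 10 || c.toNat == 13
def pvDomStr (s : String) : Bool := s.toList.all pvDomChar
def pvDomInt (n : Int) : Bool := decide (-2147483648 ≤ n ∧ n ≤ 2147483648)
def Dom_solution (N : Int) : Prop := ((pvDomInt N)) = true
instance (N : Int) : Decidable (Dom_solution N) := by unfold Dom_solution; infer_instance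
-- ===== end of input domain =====

-- B replaces A's string-building pipeline (base string, replace, int(), list, reverse, max+index)
-- by one running-best arithmetic pass per base (same results; objective: simpler).
-- A and B both loop forever on negative N, so Pre_ requires 0 ≤ N.


-- termination helper for both while-loops (n // i shrinks for 0 < n, 2 ≤ i)
theorem pvDivLt (n i : Int) (hn : 0 < n) (hi : 2 ≤ i) :
    (PySem.Int.floordiv n i).toNat < n.toNat := by
  rw [PySem.Int.floordiv_eq_ediv_of_pos (by omega)]
  have h1 := Int.mul_ediv_add_emod n i
  have h2 := Int.emod_nonneg n (by omega : i ≠ 0)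
  have h3 := Int.emod_lt_of_pos n (by omega : (0:Int) < i)
  have h4 : 0 ≤ n / i := Int.ediv_nonneg (by omega) (by omega)
  have h5 : n / i < n := by nlinarith [h1, h4]
  omega

-- ===== PORT A =====
-- 'while n != 0' of change; builds str1 least-significant digit first (as a List Char).
-- For n < 0 (with 2 ≤ i) Python loops forever; the extra stop-guard only makes the port total
-- there (such inputs are excluded by Pre_solution).
def changeLoop (i : Int) (n : Int) (str1 : List Char) : List Char :=
  if n = 0 then str1
  else if n < 0 ∨ i ≤ 1 then str1  -- totality guard: Python never terminates here
  else changeLoop i (PySem.Int.floordiv n i)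
      (str1 ++ [if PySem.Int.mod n i = 0 then '0'
                else (PySem.Str.pyGet? "012345678" (PySem.Int.mod n i)).getD '0'])
termination_by n.toNat
decreasing_by exact pvDivLt n i (by omega) (by omega)

-- def change(n,i): the final (str1)[::-1] is List.reverse (PySem.List.slice?_none_none_neg_one)
def change (n i : Int) : List Char := (changeLoop i n []).reverse

def solution (N : Int) : List Int :=
  let number : List Int :=
    (PySem.List.pyRange 2 10).foldl (fun number i =>
      let no_zero := PySem.Chars.replace (change N i) ['0'] []
      let multi :=
        (PySem.List.pyRange 0 (PySem.List.len no_zero)).foldl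
          (fun multi k => multi * (PySem.Int.ofChars? [PySem.List.pyGetD no_zero k ' ']).getD 0) 1
      number ++ [multi]) []
  let number := number.reverse   -- number[::-1]
  let m := (PySem.List.max? number (fun x => x)).getD 0
  [9 - ((PySem.List.index? number m).getD 0 : Int), m]

-- ===== PORT B =====
-- 'while m:' product of nonzero base-b digits; same totality guard for negative m.
def bprodLoop (b : Int) (m : Int) (p : Int) : Int :=
  if m = 0 then p
  else if m < 0 ∨ b ≤ 1 then p  -- totality guard: Python never terminates here
  else bprodLoop b (PySem.Int.floordiv m b)
      (if PySem.Int.mod m b ≠ 0 then p * PySem.Int.mod m b else p)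
termination_by m.toNat
decreasing_by exact pvDivLt m b (by omega) (by omega)

def solution_alt (N : Int) : List Int :=
  let r :=
    (PySem.List.pyRange 2 10).foldl (fun (s : Int × Int) b =>
      let p := bprodLoop b N 1
      if p ≥ s.1 then (p, b) else s) (0, 2)
  [r.2, r.1]

-- ===== PRECONDITION & SPEC =====
-- Pre_ excludes negative N, on which both A's and B's while-loops never terminate
-- (n // base stays -1 forever), so A returns on exactly the inputs admitted here.
def Pre_solution (N : Int) : Prop := 0 ≤ N
instance (N : Int) : Decidable (Pre_solution N) := by unfold Pre_solution; infer_instance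
def pvWitness_solution : Int := (165)

def Spec_solution (N : Int) (out : List Int) : Prop := out = solution_alt N
instance (N : Int) (out : List Int) : Decidable (Spec_solution N out) := by unfold Spec_solution; infer_instance

-- ===== CLAIM (what is proved, stated in full; the proofs are below) =====
def Claim_equal_solution : Prop := ∀ (N : Int), Dom_solution N → Pre_solution N → Spec_solution N (solution N)

-- ===== LEMMAS AND PROOFS =====

-- value of one digit character of A (int(c)) as A computes it
def pvVal (c : Char) : Int := (PySem.Int.ofChars? [c]).getD 0

-- product of the digit values of a char list
def pvMval (l : List Char) : Int := (l.map pvVal).prod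

theorem pvMval_cons (c : Char) (l : List Char) : pvMval (c :: l) = pvVal c * pvMval l := by
  simp [pvMval]

-- replace with old = "0", new = "" is filtering out '0'
theorem pvReplaceGo (fuel : Nat) (l acc : List Char) (h : l.length ≤ fuel) :
    PySem.Chars.replace.go ['0'] [] fuel l acc
      = acc.reverse ++ l.filter (fun c => !(c == '0')) := by
  induction fuel generalizing l acc with
  | zero =>
    have : l = [] := by cases l <;> simp_all
    subst this; simp [PySem.Chars.replace.go]
  | succ f ih =>
    cases l with
    | nil => simp [PySem.Chars.replace.go]
    | cons c t =>
      rw [PySem.Chars.replace.go]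
      by_cases hc : c = '0'
      · subst hc
        have hp : List.isPrefixOf ['0'] ('0' :: t) = true := by simp [List.isPrefixOf]
        simp only [hp, if_pos]
        rw [ih _ _ (by simpa using Nat.le_of_succ_le_succ h)]
        simp
      · have hp : List.isPrefixOf ['0'] (c :: t) = false := by
          simp [List.isPrefixOf]
          exact fun hq => hc hq.symm
        simp only [hp, Bool.false_eq_true, if_false]
        rw [ih _ _ (by simpa using Nat.le_of_succ_le_succ h)]
        simp [hc]

theorem pvReplaceFilter (l : List Char) :
    PySem.Chars.replace l ['0'] [] = l.filter (fun c => !(c == '0')) := by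
  rw [PySem.Chars.replace]
  rw [if_neg (by simp)]
  exact pvReplaceGo l.length l [] le_rfl

-- changeLoop is tail-append on its accumulator
theorem changeLoop_acc (i n : Int) (acc : List Char) :
    changeLoop i n acc = acc ++ changeLoop i n [] := by
  by_cases h1 : n = 0
  · subst h1
    conv_lhs => rw [changeLoop]
    conv_rhs => rw [changeLoop]
    simp
  · by_cases h2 : n < 0 ∨ i ≤ 1
    · conv_lhs => rw [changeLoop]
      conv_rhs => rw [changeLoop]
      simp [h1, h2]
    · conv_lhs => rw [changeLoop]
      conv_rhs => rw [changeLoop]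
      simp only [if_neg h1, if_neg h2]
      rw [changeLoop_acc i (PySem.Int.floordiv n i),
          changeLoop_acc i (PySem.Int.floordiv n i) ([] ++ [_])]
      simp
termination_by n.toNat
decreasing_by all_goals exact pvDivLt n i (by omega) (by omega)

-- bprodLoop factors its accumulator
theorem bprodLoop_acc (b m p : Int) : bprodLoop b m p = p * bprodLoop b m 1 := by
  by_cases h1 : m = 0
  · subst h1
    conv_lhs => rw [bprodLoop]
    conv_rhs => rw [bprodLoop]
    simp
  · by_cases h2 : m < 0 ∨ b ≤ 1
    · conv_lhs => rw [bprodLoop]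
      conv_rhs => rw [bprodLoop]
      simp [h1, h2]
    · conv_lhs => rw [bprodLoop]
      conv_rhs => rw [bprodLoop]
      simp only [if_neg h1, if_neg h2]
      rw [bprodLoop_acc b (PySem.Int.floordiv m b),
          bprodLoop_acc b (PySem.Int.floordiv m b) (if PySem.Int.mod m b ≠ 0 then 1 * PySem.Int.mod m b else 1)]
      split_ifs <;> ring
termination_by m.toNat
decreasing_by all_goals exact pvDivLt m b (by omega) (by omega)

-- a digit 1..8 prints as the character whose int() is the digit back
theorem pvVal_digit (d : Int) (h1 : 1 ≤ d) (h8 : d ≤ 8) :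
    pvVal ((PySem.Str.pyGet? "012345678" d).getD '0') = d := by
  interval_cases d <;> decide

-- per-base core: product of nonzero digits, A's string route = B's arithmetic route
theorem pvProdEq (b : Int) (hb : 2 ≤ b) (hb9 : b ≤ 9) (n : Int) (hn : 0 ≤ n) :
    pvMval ((changeLoop b n []).filter (fun c => !(c == '0'))) = bprodLoop b n 1 := by
  by_cases h1 : n = 0
  · subst h1; rw [changeLoop, bprodLoop]; simp [pvMval]
  · have h2 : ¬ (n < 0 ∨ b ≤ 1) := by omega
    have hbpos : (0:Int) < b := by omega
    have hmod := PySem.Int.mod_eq_emod_of_pos (a := n) hbpos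
    have hmem := Int.emod_nonneg n (by omega : b ≠ 0)
    have hmlt := Int.emod_lt_of_pos n hbpos
    have hdivnn : 0 ≤ PySem.Int.floordiv n b := by
      rw [PySem.Int.floordiv_eq_ediv_of_pos hbpos]
      exact Int.ediv_nonneg (by omega) (by omega)
    have ih := pvProdEq b hb hb9 (PySem.Int.floordiv n b) hdivnn
    rw [changeLoop, bprodLoop]
    simp only [if_neg h1, if_neg h2]
    rw [changeLoop_acc]
    by_cases hd : PySem.Int.mod n b = 0
    · simp only [hd, if_pos]
      simp only [List.nil_append, List.singleton_append, List.filter_cons]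
      norm_num
      exact ih
    · simp only [if_neg hd]
      have hd1 : 1 ≤ PySem.Int.mod n b := by omega
      have hd8 : PySem.Int.mod n b ≤ 8 := by omega
      have hval := pvVal_digit (PySem.Int.mod n b) hd1 hd8
      have hcne : ((PySem.Str.pyGet? "012345678" (PySem.Int.mod n b)).getD '0') ≠ '0' := by
        intro hc
        rw [hc] at hval
        have h0 : pvVal '0' = 0 := by decide
        omega
      simp only [List.nil_append, List.singleton_append, List.filter_cons]
      rw [if_pos (by simpa using hcne)]
      rw [pvMval_cons, hval, ih]
      rw [if_pos hd]
      rw [bprodLoop_acc b (PySem.Int.floordiv n b) (1 * PySem.Int.mod n b)]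
      ring
termination_by n.toNat
decreasing_by all_goals exact pvDivLt n b (by omega) (by omega)

-- B's product is at least 1 (every multiplied digit is ≥ 1)
theorem pvProd_ge (b : Int) (hb : 2 ≤ b) (m : Int) (hm : 0 ≤ m) (p : Int) (hp : 1 ≤ p) :
    1 ≤ bprodLoop b m p := by
  by_cases h1 : m = 0
  · rw [bprodLoop]; simp [h1, hp]
  · have h2 : ¬ (m < 0 ∨ b ≤ 1) := by omega
    have hbpos : (0:Int) < b := by omega
    have hmod := PySem.Int.mod_eq_emod_of_pos (a := m) hbpos
    have hmem := Int.emod_nonneg m (by omega : b ≠ 0)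
    have hdivnn : 0 ≤ PySem.Int.floordiv m b := by
      rw [PySem.Int.floordiv_eq_ediv_of_pos hbpos]
      exact Int.ediv_nonneg (by omega) (by omega)
    rw [bprodLoop]
    simp only [if_neg h1, if_neg h2]
    apply pvProd_ge b hb (PySem.Int.floordiv m b) hdivnn
    by_cases hd : PySem.Int.mod m b = 0
    · simp [hd, hp]
    · rw [if_pos hd]
      have : 1 ≤ PySem.Int.mod m b := by omega
      nlinarith
termination_by m.toNat
decreasing_by all_goals exact pvDivLt m b (by omega) (by omega)

-- A's tail: max value and 9 - index-in-reversed, as a pair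
def pvApair (l : List Int) (b : Int) : Int × Int :=
  ((PySem.List.max? l (fun x => x)).getD 0,
   b - (((PySem.List.index? l ((PySem.List.max? l (fun x => x)).getD 0)).getD 0 : Nat) : Int))

theorem pvApair_single (x b : Int) : pvApair [x] b = (x, b) := by
  simp [pvApair, PySem.List.max?_id_cons]

theorem pvApair_cons (x y : Int) (t : List Int) (b : Int) :
    pvApair (x :: y :: t) b =
      (if x ≥ (pvApair (y :: t) (b - 1)).1 then (x, b) else pvApair (y :: t) (b - 1)) := by
  have hmax2 : PySem.List.max? (x :: y :: t) (fun z => z) = some (List.foldl max x (y :: t)) :=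
    PySem.List.max?_id_cons x (y :: t)
  have hmax1 : PySem.List.max? (y :: t) (fun z => z) = some (List.foldl max y t) :=
    PySem.List.max?_id_cons y t
  have hfold : List.foldl max x (y :: t) = max x (List.foldl max y t) := by
    show List.foldl max (max x y) t = _
    exact List.foldl_assoc
  set M := List.foldl max y t with hM
  by_cases hx : x ≥ M
  · have hmx : max x M = x := max_eq_left hx
    simp only [pvApair, hmax2, hmax1, hfold, hmx, Option.getD_some,
      PySem.List.index?_cons_self, if_pos hx]
    simp
  · have hmx : max x M = M := max_eq_right (by omega)
    have hne : x ≠ M := by omega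
    have hmem : M ∈ y :: t := PySem.List.max?_mem hmax1
    have hidx : (PySem.List.index? (y :: t) M).isSome := by
      rw [PySem.List.index?_isSome_iff]; exact hmem
    obtain ⟨k, hk⟩ := Option.isSome_iff_exists.mp hidx
    simp only [pvApair, hmax2, hmax1, hfold, hmx, Option.getD_some, if_neg hx]
    rw [PySem.List.index?_cons_of_ne _ hne, hk]
    simp
    omega

-- the eight per-base products of B
def pvF (N b : Int) : Int := bprodLoop b N 1

-- A's tail on the reversed product list equals B's running-best fold, spelled out for bases 2..9
theorem pvChain (N : Int) (hN : 0 ≤ N) :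
    pvApair [pvF N 9, pvF N 8, pvF N 7, pvF N 6, pvF N 5, pvF N 4, pvF N 3, pvF N 2] 9 =
      ((PySem.List.pyRange 2 10).foldl (fun (s : Int × Int) b =>
        if bprodLoop b N 1 ≥ s.1 then (bprodLoop b N 1, b) else s) (0, 2)) := by
  have hrange : PySem.List.pyRange 2 10 = [2, 3, 4, 5, 6, 7, 8, 9] := by decide
  have h2 : (1:Int) ≤ bprodLoop 2 N 1 := pvProd_ge 2 (by omega) N hN 1 le_rfl
  rw [hrange]
  simp only [List.foldl_cons, List.foldl_nil, pvF]
  rw [show (if bprodLoop 2 N 1 ≥ (((0:Int), (2:Int))).1 then (bprodLoop 2 N 1, (2:Int)) else ((0:Int), (2:Int)))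
        = (bprodLoop 2 N 1, (2:Int)) from if_pos (by simpa using (by omega : (0:Int) ≤ bprodLoop 2 N 1))]
  rw [pvApair_cons, pvApair_cons, pvApair_cons, pvApair_cons, pvApair_cons, pvApair_cons,
      pvApair_cons, pvApair_single]
  norm_num

-- A's per-base multi equals B's per-base product
theorem pvMultiEq (N : Int) (hN : 0 ≤ N) (b : Int) (hb : 2 ≤ b) (hb9 : b ≤ 9) :
    (PySem.List.pyRange 0 (PySem.List.len (PySem.Chars.replace (change N b) ['0'] []))).foldl
        (fun multi k => multi *
          (PySem.Int.ofChars?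
            [PySem.List.pyGetD (PySem.Chars.replace (change N b) ['0'] []) k ' ']).getD 0) 1
      = bprodLoop b N 1 := by
  rw [PySem.List.foldl_pyRange_pyGetD
      (PySem.Chars.replace (change N b) ['0'] []) ' '
      (fun multi c => multi * (PySem.Int.ofChars? [c]).getD 0) 1 (by omega : (0:Int) ≤ 0)]
  simp only [Int.toNat_zero, List.drop_zero]
  have hfoldl : ∀ (l : List Char) (a : Int),
      List.foldl (fun multi c => multi * (PySem.Int.ofChars? [c]).getD 0) a l = a * pvMval l := by
    intro l
    induction l with
    | nil => intro a; simp [pvMval]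
    | cons c t ih =>
        intro a
        rw [List.foldl_cons, ih, pvMval_cons]
        show a * pvVal c * pvMval t = a * (pvVal c * pvMval t)
        ring
  rw [hfoldl, one_mul, pvReplaceFilter]
  unfold change
  rw [List.filter_reverse]
  unfold pvMval
  rw [List.map_reverse, List.prod_reverse]
  exact pvProdEq b hb hb9 N hN

-- ===== VERDICT (by name: the statement is the Claim_ definition above) =====
theorem solution_spec : Claim_equal_solution := by
  intro N _ hN
  unfold Spec_solution solution solution_alt
  have hrange : PySem.List.pyRange 2 10 = [2, 3, 4, 5, 6, 7, 8, 9] := by decide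
  rw [hrange, PySem.List.foldl_append_singleton_eq_map
      (fun i => (PySem.List.pyRange 0 (PySem.List.len (PySem.Chars.replace (change N i) ['0'] []))).foldl
          (fun multi k => multi *
            (PySem.Int.ofChars?
              [PySem.List.pyGetD (PySem.Chars.replace (change N i) ['0'] []) k ' ']).getD 0) 1)
      [2, 3, 4, 5, 6, 7, 8, 9] []]
  simp only [List.nil_append, List.map_cons, List.map_nil, List.reverse_cons, List.reverse_nil,
    List.nil_append, List.cons_append]
  rw [pvMultiEq N hN 2 (by omega) (by omega), pvMultiEq N hN 3 (by omega) (by omega),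
      pvMultiEq N hN 4 (by omega) (by omega), pvMultiEq N hN 5 (by omega) (by omega),
      pvMultiEq N hN 6 (by omega) (by omega), pvMultiEq N hN 7 (by omega) (by omega),
      pvMultiEq N hN 8 (by omega) (by omega), pvMultiEq N hN 9 (by omega) (by omega)]
  have := pvChain N hN
  unfold pvF at this
  rw [hrange] at this
  have h1 : [9 - (((PySem.List.index?
        [bprodLoop 9 N 1, bprodLoop 8 N 1, bprodLoop 7 N 1, bprodLoop 6 N 1,
         bprodLoop 5 N 1, bprodLoop 4 N 1, bprodLoop 3 N 1, bprodLoop 2 N 1]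
        ((PySem.List.max?
          [bprodLoop 9 N 1, bprodLoop 8 N 1, bprodLoop 7 N 1, bprodLoop 6 N 1,
           bprodLoop 5 N 1, bprodLoop 4 N 1, bprodLoop 3 N 1, bprodLoop 2 N 1]
          (fun x => x)).getD 0)).getD 0 : Nat) : Int),
      (PySem.List.max?
          [bprodLoop 9 N 1, bprodLoop 8 N 1, bprodLoop 7 N 1, bprodLoop 6 N 1,
           bprodLoop 5 N 1, bprodLoop 4 N 1, bprodLoop 3 N 1, bprodLoop 2 N 1]
          (fun x => x)).getD 0]
      = [(pvApair [bprodLoop 9 N 1, bprodLoop 8 N 1, bprodLoop 7 N 1, bprodLoop 6 N 1,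
          bprodLoop 5 N 1, bprodLoop 4 N 1, bprodLoop 3 N 1, bprodLoop 2 N 1] 9).2,
         (pvApair [bprodLoop 9 N 1, bprodLoop 8 N 1, bprodLoop 7 N 1, bprodLoop 6 N 1,
          bprodLoop 5 N 1, bprodLoop 4 N 1, bprodLoop 3 N 1, bprodLoop 2 N 1] 9).1] := by
    simp [pvApair]
  rw [h1, this]
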